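-- pv_equiv track=rewrite | github.com/Research-Tusk/Auto-Dashboard | etl/autoquant_etl/transforms/reconcile.py | _parse_fada_table
-- ===== SOURCE A (Python) =====
-- from typing import Dict, List, Optional, Tuple
--
-- def _parse_fada_table(
--     table: List[List[Optional[str]]],
--     verbose: bool = False,
-- ) -> Dict[str, int]:
--     """
--     Parse a pdfplumber table into segment → units mapping.
--
--     FADA PDF tables typically have columns:
--       Segment | OEM | Units | YoY%
--
--     This parser looks for rows where the first column matches known
--     segment codes or the second column looks like a unit count.
--     """
--     # Known segment labels in FADA PDFs
--     SEGMENT_MAP = {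
--         "PASSENGER VEHICLE": "PV",
--         "PASSENGER VEHICLES": "PV",
--         "PV": "PV",
--         "COMMERCIAL VEHICLE": "CV",
--         "COMMERCIAL VEHICLES": "CV",
--         "CV": "CV",
--         "TWO WHEELER": "2W",
--         "TWO WHEELERS": "2W",
--         "2-WHEELER": "2W",
--         "2W": "2W",
--         "THREE WHEELER": "3W",
--         "THREE WHEELERS": "3W",
--         "3W": "3W",
--     }
--
--     result: Dict[str, int] = {}
--     current_segment: Optional[str] = None
--
--     for row in table:
--         if not row:
--             continue
--
--         cells = [str(c).strip() if c else "" for c in row]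
--         first = cells[0].upper() if cells else ""
--
--         # Check if this row is a segment header
--         seg = SEGMENT_MAP.get(first)
--         if seg:
--             current_segment = seg
--             continue
--
--         if current_segment is None:
--             continue
--
--         # Try to find a "Total" or aggregate row
--         row_text = " ".join(cells).upper()
--         if "TOTAL" in row_text or "GRAND TOTAL" in row_text:
--             # Find the numeric cell
--             for cell in cells[1:]:
--                 cleaned = cell.replace(",", "").replace(" ", "")
--                 if cleaned.isdigit():
--                     result[current_segment] = result.get(current_segment, 0) + int(cleaned)
--                     break
--
--     return result
-- ===== SOURCE B (Python) =====
-- from typing import Dict, List, Optional, Tuple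
--
--
-- def _segment_of(label: str) -> Optional[str]:
--     """Classify a header cell into a segment code (if-chain, no dict)."""
--     u = label.upper()
--     if u in ("PASSENGER VEHICLE", "PASSENGER VEHICLES", "PV"):
--         return "PV"
--     if u in ("COMMERCIAL VEHICLE", "COMMERCIAL VEHICLES", "CV"):
--         return "CV"
--     if u in ("TWO WHEELER", "TWO WHEELERS", "2-WHEELER", "2W"):
--         return "2W"
--     if u in ("THREE WHEELER", "THREE WHEELERS", "3W"):
--         return "3W"
--     return None
--
--
-- def _clean(cell: str) -> str:
--     return cell.replace(",", "").replace(" ", "")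
--
--
-- def _total_value(cells: List[str]) -> Optional[int]:
--     """First cell of cells[1:] whose cleaned form is a digit string, as int."""
--     m = next((c for c in cells[1:] if _clean(c).isdigit()), None)
--     return None if m is None else int(_clean(m))
--
--
-- def _contributions(table: List[List[Optional[str]]]) -> List[Tuple[str, int]]:
--     """Flat stream of (segment, units) pairs, one per countable total row."""
--     out: List[Tuple[str, int]] = []
--     seg: Optional[str] = None
--     for row in table:
--         if not row:
--             continue
--         cells = ["" if not c else str(c).strip() for c in row]
--         s = _segment_of(cells[0])
--         if s is not None:
--             seg = s
--         elif seg is not None and "TOTAL" in " ".join(cells).upper():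
--             n = _total_value(cells)
--             if n is not None:
--                 out.append((seg, n))
--     return out
--
--
-- def _parse_fada_table(
--     table: List[List[Optional[str]]],
--     verbose: bool = False,
-- ) -> Dict[str, int]:
--     contribs = _contributions(table)
--     order: List[str] = []
--     for s, _ in contribs:
--         if s not in order:
--             order.append(s)
--     return {s: sum(n for t, n in contribs if t == s) for s in order}
-- ===== Notes on version B (the rewrite author's own statement) =====
-- stated objective: alternative
-- what changed: A is one stateful scan that accumulates straight into the result dict; B classifies headers with an if-chain instead of a dict, collects a flat list of (segment, units) contribution pairs (first numeric cell found via next() on a generator), and then builds the result by a group-by aggregation: first-occurrence key order plus a filtered sum per segment.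
import Mathlib
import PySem

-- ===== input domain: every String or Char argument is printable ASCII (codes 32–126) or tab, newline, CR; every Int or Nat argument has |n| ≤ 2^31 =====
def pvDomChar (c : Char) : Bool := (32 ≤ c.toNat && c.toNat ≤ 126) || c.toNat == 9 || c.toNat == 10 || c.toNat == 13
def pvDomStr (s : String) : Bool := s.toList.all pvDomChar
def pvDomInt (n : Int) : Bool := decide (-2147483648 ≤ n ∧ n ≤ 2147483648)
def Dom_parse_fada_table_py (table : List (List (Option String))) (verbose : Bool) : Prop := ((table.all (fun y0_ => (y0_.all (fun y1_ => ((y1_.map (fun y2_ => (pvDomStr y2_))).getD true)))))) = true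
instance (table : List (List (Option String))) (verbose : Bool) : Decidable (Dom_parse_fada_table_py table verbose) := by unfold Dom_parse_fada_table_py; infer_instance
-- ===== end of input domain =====

-- B replaces A's single stateful scan with incremental dict accumulation by: an if-chain
-- segment classifier, a flat pass collecting (segment, units) contribution pairs, then a
-- group-by aggregation (first-occurrence key order, filtered sums); objective: alternative.

-- ===== PORT A =====
-- SEGMENT_MAP literal (A's dict)
def pvSegMap : PySem.Dict String String := PySem.Dict.ofList
  [("PASSENGER VEHICLE", "PV"), ("PASSENGER VEHICLES", "PV"), ("PV", "PV"),
   ("COMMERCIAL VEHICLE", "CV"), ("COMMERCIAL VEHICLES", "CV"), ("CV", "CV"),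
   ("TWO WHEELER", "2W"), ("TWO WHEELERS", "2W"), ("2-WHEELER", "2W"), ("2W", "2W"),
   ("THREE WHEELER", "3W"), ("THREE WHEELERS", "3W"), ("3W", "3W")]

-- cells = [str(c).strip() if c else "" for c in row]  (None and "" are falsy; identical line in both Pythons)
def pvCells (row : List (Option String)) : List String :=
  row.map (fun c => match c with
    | none => ""
    | some s => if s = "" then "" else PySem.Str.strip s)

-- A's inner 'for cell in cells[1:]: … break' loop: first digit-cell as int (break = stop)
def pvFindNumA : List String → Option Int
  | [] => none
  | cell :: rest =>
    let cleaned := PySem.Str.replace (PySem.Str.replace cell "," "") " " ""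
    if PySem.Str.strIsdigit cleaned then some ((PySem.Int.ofStr? cleaned).getD 0)
    else pvFindNumA rest

-- one iteration of A's loop over 'table', state = (result, current_segment)
def pvStepA (st : PySem.Dict String Int × Option String) (row : List (Option String)) :
    PySem.Dict String Int × Option String :=
  if row.isEmpty then st
  else
    let cells := pvCells row
    let first := if cells.isEmpty then "" else PySem.Str.upper (cells.headD "")
    match pvSegMap.get? first with
    | some seg => (st.1, some seg)
    | none =>
      match st.2 with
      | none => st
      | some cs =>
        let rowText := PySem.Str.upper (PySem.Str.join " " cells)
        if PySem.Str.isIn "TOTAL" rowText || PySem.Str.isIn "GRAND TOTAL" rowText then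
          match pvFindNumA (PySem.List.slice cells (some 1) none) with
          | some n => (st.1.insert cs (st.1.getD cs 0 + n), st.2)
          | none => st
        else st

def parse_fada_table_py (table : List (List (Option String))) (verbose : Bool) : List (String × Int) :=
  (table.foldl pvStepA ((PySem.Dict.empty : PySem.Dict String Int), (none : Option String))).1.items

-- ===== PORT B =====
-- Source B's _segment_of: an if-chain of membership tests, no dict
def pvSegOf (label : String) : Option String :=
  let u := PySem.Str.upper label
  if ["PASSENGER VEHICLE", "PASSENGER VEHICLES", "PV"].contains u then some "PV"
  else if ["COMMERCIAL VEHICLE", "COMMERCIAL VEHICLES", "CV"].contains u then some "CV"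
  else if ["TWO WHEELER", "TWO WHEELERS", "2-WHEELER", "2W"].contains u then some "2W"
  else if ["THREE WHEELER", "THREE WHEELERS", "3W"].contains u then some "3W"
  else none

-- Source B's _clean
def pvClean (cell : String) : String :=
  PySem.Str.replace (PySem.Str.replace cell "," "") " " ""

-- Source B's _total_value: next() over a filtering generator, then one int() conversion
def pvTotalValue (cells : List String) : Option Int :=
  ((PySem.List.slice cells (some 1) none).find? (fun c => PySem.Str.strIsdigit (pvClean c))).map
    (fun m => (PySem.Int.ofStr? (pvClean m)).getD 0)

-- Source B's _contributions loop body, state = (out, seg)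
def pvContribStep (st : List (String × Int) × Option String) (row : List (Option String)) :
    List (String × Int) × Option String :=
  if row.isEmpty then st
  else
    let cells := pvCells row
    match pvSegOf (cells.headD "") with
    | some s => (st.1, some s)
    | none =>
      match st.2 with
      | some seg =>
        if PySem.Str.isIn "TOTAL" (PySem.Str.upper (PySem.Str.join " " cells)) then
          match pvTotalValue cells with
          | some n => (st.1 ++ [(seg, n)], st.2)
          | none => st
        else st
      | none => st

def pvContributions (table : List (List (Option String))) : List (String × Int) :=
  (table.foldl pvContribStep (([] : List (String × Int)), (none : Option String))).1

def parse_fada_table_py_alt (table : List (List (Option String))) (verbose : Bool) : List (String × Int) :=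
  let contribs := pvContributions table
  -- the 'order' loop: first-occurrence list of the segment codes
  let order := contribs.foldl (fun o p => PySem.Set.add o p.1) PySem.Set.empty
  -- the dict comprehension {s: sum(n for t, n in contribs if t == s) for s in order}
  (order.foldl
    (fun d s => d.insert s (((contribs.filter (fun p => p.1 == s)).map (·.2)).sum))
    (PySem.Dict.empty : PySem.Dict String Int)).items

-- ===== PRECONDITION & SPEC =====
def Spec_parse_fada_table_py (table : List (List (Option String))) (verbose : Bool) (out : List (String × Int)) : Prop := out = parse_fada_table_py_alt table verbose
instance (table : List (List (Option String))) (verbose : Bool) (out : List (String × Int)) : Decidable (Spec_parse_fada_table_py table verbose out) := by unfold Spec_parse_fada_table_py; infer_instance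

-- ===== CLAIM (what is proved, stated in full; the proofs are below) =====
def Claim_equal_parse_fada_table_py : Prop := ∀ (table : List (List (Option String))) (verbose : Bool), Dom_parse_fada_table_py table verbose → Spec_parse_fada_table_py table verbose (parse_fada_table_py table verbose)

-- ===== LEMMAS AND PROOFS =====

-- A's fold step over the dict
def pvIns (d : PySem.Dict String Int) (p : String × Int) : PySem.Dict String Int :=
  d.insert p.1 (d.getD p.1 0 + p.2)

-- the two segment classifiers agree (A uppercases before the dict lookup, B inside)
lemma pvSegOf_aux (u : String) : pvSegMap.get? u =
    (if ["PASSENGER VEHICLE", "PASSENGER VEHICLES", "PV"].contains u then some "PV"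
     else if ["COMMERCIAL VEHICLE", "COMMERCIAL VEHICLES", "CV"].contains u then some "CV"
     else if ["TWO WHEELER", "TWO WHEELERS", "2-WHEELER", "2W"].contains u then some "2W"
     else if ["THREE WHEELER", "THREE WHEELERS", "3W"].contains u then some "3W"
     else none) := by
  by_cases h : u ∈ (["PASSENGER VEHICLE", "PASSENGER VEHICLES", "PV", "COMMERCIAL VEHICLE",
      "COMMERCIAL VEHICLES", "CV", "TWO WHEELER", "TWO WHEELERS", "2-WHEELER", "2W",
      "THREE WHEELER", "THREE WHEELERS", "3W"] : List String)
  · simp only [List.mem_cons, List.not_mem_nil, or_false] at h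
    rcases h with rfl|rfl|rfl|rfl|rfl|rfl|rfl|rfl|rfl|rfl|rfl|rfl|rfl <;> decide
  · simp only [List.mem_cons, List.not_mem_nil, or_false, not_or] at h
    obtain ⟨h1,h2,h3,h4,h5,h6,h7,h8,h9,h10,h11,h12,h13⟩ := h
    have hm : pvSegMap = PySem.Dict.mk
      [("PASSENGER VEHICLE", "PV"), ("PASSENGER VEHICLES", "PV"), ("PV", "PV"),
       ("COMMERCIAL VEHICLE", "CV"), ("COMMERCIAL VEHICLES", "CV"), ("CV", "CV"),
       ("TWO WHEELER", "2W"), ("TWO WHEELERS", "2W"), ("2-WHEELER", "2W"), ("2W", "2W"),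
       ("THREE WHEELER", "3W"), ("THREE WHEELERS", "3W"), ("3W", "3W")] := by decide
    rw [hm]
    simp [PySem.Dict.get?,
      Ne.symm h1, Ne.symm h2, Ne.symm h3, Ne.symm h4, Ne.symm h5, Ne.symm h6, Ne.symm h7,
      Ne.symm h8, Ne.symm h9, Ne.symm h10, Ne.symm h11, Ne.symm h12, Ne.symm h13,
      h1,h2,h3,h4,h5,h6,h7,h8,h9,h10,h11,h12,h13]

lemma pvSegOf_eq (s : String) :
    pvSegMap.get? (PySem.Str.upper s) = pvSegOf s := pvSegOf_aux _

-- A's break-loop = B's find?/map pipeline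
lemma pvFindNumA_eq (l : List String) :
    pvFindNumA l = (l.find? (fun c => PySem.Str.strIsdigit (pvClean c))).map
      (fun m => (PySem.Int.ofStr? (pvClean m)).getD 0) := by
  induction l with
  | nil => rfl
  | cons c rest ih =>
    simp only [pvFindNumA, List.find?, pvClean]
    cases h : PySem.Chars.strIsdigit (PySem.Chars.replace (PySem.Chars.replace c.toList [','] []) [' '] []) <;>
      simp [pvClean, h, ih]

-- "GRAND TOTAL" in t implies "TOTAL" in t, so A's disjunction is just the TOTAL test
lemma pvGrandTotal (t : String) :
    (PySem.Str.isIn "TOTAL" t || PySem.Str.isIn "GRAND TOTAL" t) = PySem.Str.isIn "TOTAL" t := by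
  cases h : PySem.Str.isIn "TOTAL" t with
  | true => simp
  | false =>
    cases hg : PySem.Str.isIn "GRAND TOTAL" t with
    | false => simp
    | true =>
      have h2 : PySem.Str.isIn "TOTAL" t = true :=
        (PySem.Str.isIn_iff_infix _ _).mpr
          (List.IsInfix.trans (by decide) ((PySem.Str.isIn_iff_infix _ _).mp hg))
      rw [h] at h2
      exact absurd h2 (by simp)

-- B's contribution pass appends; factor the accumulator out
lemma pvContrib_acc (table : List (List (Option String))) :
    ∀ (acc : List (String × Int)) (cur : Option String),
      table.foldl pvContribStep (acc, cur) =
        (acc ++ (table.foldl pvContribStep ([], cur)).1, (table.foldl pvContribStep ([], cur)).2) := by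
  induction table with
  | nil => intro acc cur; simp
  | cons row rest ih =>
    intro acc cur
    simp only [List.foldl_cons]
    by_cases hrow : row.isEmpty
    · simp only [pvContribStep, hrow, if_pos]
      exact ih acc cur
    · simp only [pvContribStep, hrow, Bool.false_eq_true, if_neg, not_false_iff]
      cases hseg : pvSegOf ((pvCells row).headD "") with
      | some h => exact ih acc (some h)
      | none =>
        cases cur with
        | none => exact ih acc none
        | some s =>
          dsimp only
          by_cases ht : PySem.Str.isIn "TOTAL" (PySem.Str.upper (PySem.Str.join " " (pvCells row))) = true
          · simp only [ht, if_pos]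
            cases hn : pvTotalValue (pvCells row) with
            | none => exact ih acc (some s)
            | some n =>
              dsimp only
              rw [ih (acc ++ [(s, n)]) (some s), ih ([] ++ [(s, n)]) (some s)]
              simp
          · simp only [Bool.not_eq_true] at ht
            simp only [ht, Bool.false_eq_true, if_neg, not_false_iff]
            exact ih acc (some s)

-- main invariant: A's fold from (d, cur) is the insert-fold of the contributions from cur
set_option maxHeartbeats 1000000 in
lemma pvMain (table : List (List (Option String))) :
    ∀ (d : PySem.Dict String Int) (cur : Option String),
      (table.foldl pvStepA (d, cur)).1 =
        ((table.foldl pvContribStep ([], cur)).1).foldl pvIns d := by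
  induction table with
  | nil => intro d cur; rfl
  | cons row rest ih =>
    intro d cur
    simp only [List.foldl_cons]
    by_cases hrow : row.isEmpty
    · simp only [pvStepA, pvContribStep, hrow, if_pos]
      exact ih d cur
    · have hcells : (pvCells row).isEmpty = false := by
        cases row with
        | nil => simp at hrow
        | cons a l => simp [pvCells]
      have hfirst : (if (pvCells row).isEmpty then "" else PySem.Str.upper ((pvCells row).headD ""))
          = PySem.Str.upper ((pvCells row).headD "") := by simp [hcells]
      simp only [pvStepA, pvContribStep, hrow, Bool.false_eq_true, if_neg, not_false_iff,
        hfirst, ← pvSegOf_eq]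
      cases hseg : pvSegMap.get? (PySem.Str.upper ((pvCells row).headD "")) with
      | some h => exact ih d (some h)
      | none =>
        cases cur with
        | none => exact ih d none
        | some s =>
          dsimp only
          rw [pvGrandTotal]
          by_cases ht : PySem.Str.isIn "TOTAL" (PySem.Str.upper (PySem.Str.join " " (pvCells row))) = true
          · simp only [ht, if_pos]
            rw [pvFindNumA_eq]
            simp only [pvTotalValue]
            cases hf : (PySem.List.slice (pvCells row) (some 1) none).find?
                (fun c => PySem.Str.strIsdigit (pvClean c)) with
            | none =>
              simp only [Option.map_none]
              exact ih d (some s)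
            | some m =>
              simp only [Option.map_some]
              rw [pvContrib_acc rest ([] ++ [(s, (PySem.Int.ofStr? (pvClean m)).getD 0)]) (some s)]
              simp only [List.nil_append, List.singleton_append, List.foldl_cons]
              generalize (PySem.Int.ofStr? (pvClean m)).getD 0 = v
              exact ih (pvIns d (s, v)) (some s)
          · simp only [Bool.not_eq_true] at ht
            simp only [ht, Bool.false_eq_true, if_neg, not_false_iff]
            exact ih d (some s)

-- value of the insert-fold at a key
lemma pvIns_getD (l : List (String × Int)) :
    ∀ (d : PySem.Dict String Int) (k : String),
      (l.foldl pvIns d).getD k 0 = d.getD k 0 + ((l.filter (fun p => p.1 == k)).map (·.2)).sum := by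
  induction l with
  | nil => intro d k; simp
  | cons p rest ih =>
    intro d k
    simp only [List.foldl_cons, List.filter_cons, ih]
    by_cases h : p.1 = k
    · subst h; simp [pvIns]; ring
    · have : (p.1 == k) = false := by simp [h]
      simp [pvIns, PySem.Dict.getD_insert, this, Ne.symm h]

-- ===== VERDICT (by name: the statement is the Claim_ definition above) =====
theorem parse_fada_table_py_spec : Claim_equal_parse_fada_table_py := by
  intro table verbose _
  unfold Spec_parse_fada_table_py parse_fada_table_py parse_fada_table_py_alt pvContributions
  rw [pvMain]
  dsimp only
  set contribs := ((table.foldl pvContribStep ([], none)).1) with hc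
  have horder : contribs.foldl (fun o p => PySem.Set.add o p.1) PySem.Set.empty
      = PySem.Set.ofList (contribs.map Prod.fst) := by
    rw [← PySem.Set.update_map_eq_foldl_add]
    rfl
  have hnd : (contribs.foldl pvIns (PySem.Dict.empty : PySem.Dict String Int)).keys.Nodup := by
    unfold pvIns
    exact PySem.Dict.nodup_keys_foldl_insert_key contribs (fun p => p.1)
      (fun d p => d.getD p.1 0 + p.2) _ PySem.Dict.nodup_keys_empty
  have hkeys : (contribs.foldl pvIns (PySem.Dict.empty : PySem.Dict String Int)).keys
      = PySem.Set.ofList (contribs.map Prod.fst) := by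
    unfold pvIns
    rw [PySem.Dict.keys_foldl_insert_key]
    rfl
  rw [PySem.Dict.items_eq_map_keys _ hnd 0, hkeys, horder]
  have hfresh : ∀ s_1 ∈ PySem.Set.ofList (contribs.map Prod.fst),
      (PySem.Dict.empty : PySem.Dict String Int).contains s_1 = false := by
    intro _ _; exact PySem.Dict.contains_empty _
  have hB := PySem.Dict.items_foldl_insert_fresh
      (l := PySem.Set.ofList (contribs.map Prod.fst))
      (d := (PySem.Dict.empty : PySem.Dict String Int))
      (k := fun s => s)
      (v := fun s => ((contribs.filter (fun p => p.1 == s)).map (·.2)).sum)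
      hfresh (by simpa using PySem.Set.nodup_ofList (l := contribs.map Prod.fst))
  simp only [] at hB
  rw [hB]
  rw [show (PySem.Dict.empty : PySem.Dict String Int).items = [] from rfl, List.nil_append]
  apply List.map_congr_left
  intro k hk
  rw [pvIns_getD]
  simp
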